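-- pv_equiv track=rewrite | github.com/andrew848/study-python | collegeRank.py | rankCollegeRecursively
-- ===== SOURCE A (Python) =====
-- colleges = {
--             'princeton': 1,
--             'harvard': 2,
--             'mit': 3,
--             'yale': 4,
--             'stanford': 5,
--             'uc': 6, 'up': 7,
--             'cit': 8,
--             'duke': 9,
--             'jhu': 10,
--             'nu': 11,
--             'dartmouth': 12,
--             'brown': 13,
--             'vanderbilt': 14,
--             'wu': 15,
--             'cornell': 16,
--             'rice': 17,
--             'notre dame': 18,
--             'ucla': 19,
--             'emory': 20,
--             'uc berkeley ': 21,
--             'georgetown': 22,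
--             'um ann abror': 23,
--             'carnegie': 24,
--             'uv': 25,
--             'usc': 26,
--             'nyu': 27,
--             'tufts': 28,
--             'uc santa barbara': 28,
--             'unc': 28,
--             'wfu': 28,
--             'ucsd': 29,
--             'ur': 30,
-- }
--
-- def rankCollegeRecursively(college, msg):
--     lower = college.lower()
--     if lower not in colleges:
--         if lower == 'all':
--             for i in colleges:
--                 msg = msg + rankCollegeRecursively(i, msg) + '\n'
--             return msg
--         else:
--             msg = college + ' is out of range'
--     else:
--         msg = college + ' is ranked ' + str(colleges[lower]) + ' among all US colleges'
--     return msg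
-- ===== SOURCE B (Python) =====
-- colleges = {
--             'princeton': 1,
--             'harvard': 2,
--             'mit': 3,
--             'yale': 4,
--             'stanford': 5,
--             'uc': 6, 'up': 7,
--             'cit': 8,
--             'duke': 9,
--             'jhu': 10,
--             'nu': 11,
--             'dartmouth': 12,
--             'brown': 13,
--             'vanderbilt': 14,
--             'wu': 15,
--             'cornell': 16,
--             'rice': 17,
--             'notre dame': 18,
--             'ucla': 19,
--             'emory': 20,
--             'uc berkeley ': 21,
--             'georgetown': 22,
--             'um ann abror': 23,
--             'carnegie': 24,
--             'uv': 25,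
--             'usc': 26,
--             'nyu': 27,
--             'tufts': 28,
--             'uc santa barbara': 28,
--             'unc': 28,
--             'wfu': 28,
--             'ucsd': 29,
--             'ur': 30,
-- }
--
-- # B works on a plain association list with small recursive helpers:
-- # no dict membership test, no self-recursion of the main function.
-- _PAIRS = list(colleges.items())
--
-- def _line(name, rank):
--     return name + ' is ranked ' + str(rank) + ' among all US colleges'
--
-- def _find(pairs, key):
--     if not pairs:
--         return None
--     (k, v) = pairs[0]
--     return v if k == key else _find(pairs[1:], key)
--
-- def _allLines(pairs):
--     if not pairs:
--         return ''
--     (k, v) = pairs[0]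
--     return _line(k, v) + '\n' + _allLines(pairs[1:])
--
-- def rankCollegeRecursively(college, msg):
--     lower = college.lower()
--     if lower == 'all':
--         return msg + _allLines(_PAIRS)
--     rank = _find(_PAIRS, lower)
--     if rank is None:
--         return college + ' is out of range'
--     return _line(college, rank)
-- ===== Notes on version B (the rewrite author's own statement) =====
-- stated objective: alternative
-- what changed: B replaces A's self-recursive dict-membership logic by structural recursion over a plain association list: a recursive _find lookup, a recursive _allLines builder for the 'all' listing (no recursive call of the main function, no dict indexing), and the 'all' test done first.
import Mathlib
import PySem

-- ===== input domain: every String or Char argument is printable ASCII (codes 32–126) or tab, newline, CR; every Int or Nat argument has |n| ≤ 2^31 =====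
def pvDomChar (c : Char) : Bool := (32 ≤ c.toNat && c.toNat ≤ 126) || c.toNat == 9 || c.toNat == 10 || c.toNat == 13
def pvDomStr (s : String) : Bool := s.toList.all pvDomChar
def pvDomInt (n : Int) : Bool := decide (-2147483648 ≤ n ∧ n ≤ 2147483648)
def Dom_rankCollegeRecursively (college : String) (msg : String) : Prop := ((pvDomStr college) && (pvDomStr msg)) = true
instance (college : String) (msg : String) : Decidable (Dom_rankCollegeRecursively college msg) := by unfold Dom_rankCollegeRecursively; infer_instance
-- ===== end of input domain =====

set_option maxRecDepth 100000
set_option maxHeartbeats 1000000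

-- B replaces A's self-recursion and dict membership/indexing by structural recursion over a plain association list (alternative decomposition, same cost).


-- the module-level constant 'colleges' (A's side: a PySem.Dict, as in the Python)
def pvColleges : PySem.Dict String Int := PySem.Dict.ofList [
  ("princeton", 1), ("harvard", 2), ("mit", 3), ("yale", 4), ("stanford", 5),
  ("uc", 6), ("up", 7), ("cit", 8), ("duke", 9), ("jhu", 10), ("nu", 11),
  ("dartmouth", 12), ("brown", 13), ("vanderbilt", 14), ("wu", 15), ("cornell", 16),
  ("rice", 17), ("notre dame", 18), ("ucla", 19), ("emory", 20), ("uc berkeley ", 21),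
  ("georgetown", 22), ("um ann abror", 23), ("carnegie", 24), ("uv", 25), ("usc", 26),
  ("nyu", 27), ("tufts", 28), ("uc santa barbara", 28), ("unc", 28), ("wfu", 28),
  ("ucsd", 29), ("ur", 30)]

-- every key of the dict is lowercase and in the dict (cited by the port's decreasing_by);
-- stated on a closed Bool first so the kernel checks it by evaluation (rfl), not by a decide term
theorem pvKeys_lower_all : pvColleges.keys.all (fun k => pvColleges.contains (PySem.Str.lower k)) = true := by rfl
theorem pvKeys_lower_contains : ∀ k ∈ pvColleges.keys, pvColleges.contains (PySem.Str.lower k) = true := by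
  intro k hk; exact List.all_eq_true.mp pvKeys_lower_all k hk

-- ===== PORT A =====
-- A's recursion: on the 'all' branch it calls itself on each key; each key is in the dict, so depth ≤ 1.
-- 'colleges[lower]' is ported as getD with an unused default 0 (membership holds on that branch, so it is exact).
def rankCollegeRecursively (college : String) (msg : String) : String :=
  let lower := PySem.Str.lower college
  if pvColleges.contains lower = false then
    if lower == "all" then
      pvColleges.keys.attach.foldl
        (fun m i => m ++ rankCollegeRecursively i.1 m ++ "\n") msg
    else
      college ++ " is out of range"
  else
    college ++ " is ranked " ++ PySem.Int.toStr (pvColleges.getD lower 0) ++ " among all US colleges"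
termination_by (if pvColleges.contains (PySem.Str.lower college) then 0 else 1)
decreasing_by
  rename_i hnot hall
  simp only [beq_iff_eq] at hall
  simp only [pvKeys_lower_contains i.1 i.2]
  rw [show PySem.Str.lower college = "all" from hall]
  simp [show pvColleges.contains "all" = false from hall ▸ hnot]

-- ===== PORT B =====
-- _PAIRS = list(colleges.items()) (B's side: a plain association list)
def pvPairs : List (String × Int) := [
  ("princeton", 1), ("harvard", 2), ("mit", 3), ("yale", 4), ("stanford", 5),
  ("uc", 6), ("up", 7), ("cit", 8), ("duke", 9), ("jhu", 10), ("nu", 11),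
  ("dartmouth", 12), ("brown", 13), ("vanderbilt", 14), ("wu", 15), ("cornell", 16),
  ("rice", 17), ("notre dame", 18), ("ucla", 19), ("emory", 20), ("uc berkeley ", 21),
  ("georgetown", 22), ("um ann abror", 23), ("carnegie", 24), ("uv", 25), ("usc", 26),
  ("nyu", 27), ("tufts", 28), ("uc santa barbara", 28), ("unc", 28), ("wfu", 28),
  ("ucsd", 29), ("ur", 30)]

def pvLine (name : String) (rank : Int) : String :=
  name ++ " is ranked " ++ PySem.Int.toStr rank ++ " among all US colleges"

def pvFind? : List (String × Int) → String → Option Int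
  | [], _ => none
  | (k, v) :: rest, key => if k == key then some v else pvFind? rest key

def pvAllLines : List (String × Int) → String
  | [] => ""
  | (k, v) :: rest => pvLine k v ++ "\n" ++ pvAllLines rest

def rankCollegeRecursively_alt (college : String) (msg : String) : String :=
  let lower := PySem.Str.lower college
  if lower == "all" then
    msg ++ pvAllLines pvPairs
  else
    match pvFind? pvPairs lower with
    | none => college ++ " is out of range"
    | some rank => pvLine college rank

-- ===== PRECONDITION & SPEC =====
def Spec_rankCollegeRecursively (college : String) (msg : String) (out : String) : Prop := out = rankCollegeRecursively_alt college msg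
instance (college : String) (msg : String) (out : String) : Decidable (Spec_rankCollegeRecursively college msg out) := by unfold Spec_rankCollegeRecursively; infer_instance

-- ===== CLAIM (what is proved, stated in full; the proofs are below) =====
def Claim_equal_rankCollegeRecursively : Prop := ∀ (college : String) (msg : String), Dom_rankCollegeRecursively college msg → Spec_rankCollegeRecursively college msg (rankCollegeRecursively college msg)

-- ===== LEMMAS AND PROOFS =====

-- the dict IS the plain pair list (keys are distinct, so ofList never overwrites)
theorem pvColleges_eq_mk : pvColleges = PySem.Dict.mk pvPairs := by rfl

-- Dict lookup on a literal agrees with B's recursive assoc-list find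
theorem get?_eq_find? (l : List (String × Int)) (x : String) :
    (PySem.Dict.mk l).get? x = pvFind? l x := by
  induction l with
  | nil => simp [pvFind?, PySem.Dict.get?]
  | cons p rest ih =>
    obtain ⟨k, v⟩ := p
    rw [PySem.Dict.get?_mk_cons, pvFind?, ih]

-- "all" is not a key of the dict
theorem all_not_in : pvColleges.contains "all" = false := by rfl

-- on a key present in the dict, A returns the ranked line and ignores msg
theorem rankA_of_contains (k : String) (hk : pvColleges.contains (PySem.Str.lower k) = true)
    (m : String) :
    rankCollegeRecursively k m
      = k ++ " is ranked " ++ PySem.Int.toStr (pvColleges.getD (PySem.Str.lower k) 0)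
          ++ " among all US colleges" := by
  rw [rankCollegeRecursively]
  simp [hk]

-- A's line for one key, as A's ranked branch produces it
def pvALines : List String → String
  | [] => ""
  | k :: rest =>
      (k ++ " is ranked " ++ PySem.Int.toStr (pvColleges.getD (PySem.Str.lower k) 0)
        ++ " among all US colleges") ++ "\n" ++ pvALines rest

-- A's 'all' loop over any list of contained keys: the accumulator is a pure prefix of a line block
theorem foldA (l : List String)
    (h : ∀ k ∈ l, pvColleges.contains (PySem.Str.lower k) = true) (m : String) :
    l.foldl (fun m i => m ++ rankCollegeRecursively i m ++ "\n") m = m ++ pvALines l := by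
  induction l generalizing m with
  | nil => simp [pvALines]
  | cons x xs ih =>
    rw [List.foldl_cons, rankA_of_contains x (h x (by simp)),
        ih (fun k hk => h k (by simp [hk]))]
    simp [pvALines, String.append_assoc]

-- A's accumulated 'all' lines are B's recursively built block (both closed literals)
theorem lines_eq : pvALines pvColleges.keys = pvAllLines pvPairs := by rfl

-- ===== VERDICT (by name: the statement is the Claim_ definition above) =====
theorem rankCollegeRecursively_spec : Claim_equal_rankCollegeRecursively := by
  intro college msg _
  unfold Spec_rankCollegeRecursively rankCollegeRecursively_alt
  rw [rankCollegeRecursively]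
  cases h : pvFind? pvPairs (PySem.Str.lower college) with
  | some r =>
    have hg : pvColleges.get? (PySem.Str.lower college) = some r := by
      rw [pvColleges_eq_mk, get?_eq_find?, h]
    have hc : pvColleges.contains (PySem.Str.lower college) = true := by
      rw [PySem.Dict.contains_eq_isSome_get?, hg]; rfl
    have hall : ¬ PySem.Str.lower college = "all" := by
      intro e; rw [e] at hc; exact absurd hc (by rw [all_not_in]; decide)
    simp [hc, h, hall, pvLine, PySem.Dict.getD_eq_get?_getD, hg]
  | none =>
    have hg : pvColleges.get? (PySem.Str.lower college) = none := by
      rw [pvColleges_eq_mk, get?_eq_find?, h]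
    have hc : pvColleges.contains (PySem.Str.lower college) = false := by
      rw [PySem.Dict.contains_eq_isSome_get?, hg]; rfl
    by_cases hall : PySem.Str.lower college = "all"
    · simp only [hall] at hc ⊢
      simp only [hc, beq_self_eq_true, if_pos]
      rw [List.foldl_attach (f := fun m k => m ++ rankCollegeRecursively k m ++ "\n"),
          foldA pvColleges.keys pvKeys_lower_contains msg, lines_eq]
    · simp [h, hc, hall]
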